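-- pv_equiv track=rewrite | github.com/iamtwobe/controlegastos-py | main.py | verify_value
-- ===== SOURCE A (Python) =====
-- def verify_value(valor):
--     """
--         Verifica se há caractéres inválidos no valor inserido e os remove.
--
--         Parâmetros:
--         - valor (str): Valor a ser verificado.
--
--         Retorna:
--         - valor (str): Valor sem caractéres inválidos.
--
--         Exemplos:
--         >>> verify_value('R$ 123,45')
--         '123,45'
--
--         >>> verify_value('123.45$')
--         '123.45'
--
--         >>> verify_value('USD$ 123.45')
--         '123.45'
--     """
--
--     BAN_CHARS = '$BRLUSDusdbrl '
--     if any(char in valor for char in BAN_CHARS):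
--         for char in BAN_CHARS:
--             valor = valor.replace(char, '')
--         return valor
--     else:
--         return valor
-- ===== SOURCE B (Python) =====
-- BAN_CHARS = frozenset('$BRLUSDusdbrl ')
--
-- def verify_value(valor):
--     return ''.join(c for c in valor if c not in BAN_CHARS)
-- ===== Notes on version B (the rewrite author's own statement) =====
-- stated objective: simpler
-- what changed: Replaced the any()-guard plus one full-string replace pass per banned character (14 scans) by a single filtering pass over the input with a set membership test.
import Mathlib
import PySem

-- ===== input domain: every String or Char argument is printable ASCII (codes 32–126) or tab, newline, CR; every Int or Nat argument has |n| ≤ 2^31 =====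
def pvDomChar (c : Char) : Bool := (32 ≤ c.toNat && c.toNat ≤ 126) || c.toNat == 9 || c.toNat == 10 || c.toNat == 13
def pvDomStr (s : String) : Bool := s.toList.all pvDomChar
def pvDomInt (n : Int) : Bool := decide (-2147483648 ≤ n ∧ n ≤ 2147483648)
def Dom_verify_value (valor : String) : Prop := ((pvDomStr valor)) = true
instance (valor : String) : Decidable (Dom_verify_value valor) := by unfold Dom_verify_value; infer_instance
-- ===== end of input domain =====

-- B replaces A's any()-guard plus one replace pass per banned character by a single
-- filtering pass over the input; return values are identical (no side effects involved).

-- ===== PORT A =====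
def pvBanChars : List Char := "$BRLUSDusdbrl ".toList

def verify_value (valor : String) : String :=
  if pvBanChars.any (fun ch => PySem.Str.isIn (String.ofList [ch]) valor) then
    pvBanChars.foldl (fun v ch => PySem.Str.replace v (String.ofList [ch]) "") valor
  else
    valor

-- ===== PORT B =====
def verify_value_alt (valor : String) : String :=
  String.ofList (valor.toList.filter (fun c => !pvBanChars.contains c))

-- ===== PRECONDITION & SPEC =====
def Spec_verify_value (valor : String) (out : String) : Prop := out = verify_value_alt valor
instance (valor : String) (out : String) : Decidable (Spec_verify_value valor out) := by unfold Spec_verify_value; infer_instance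

-- ===== CLAIM (what is proved, stated in full; the proofs are below) =====
def Claim_equal_verify_value : Prop := ∀ (valor : String), Dom_verify_value valor → Spec_verify_value valor (verify_value valor)

-- ===== LEMMAS AND PROOFS =====

-- replace.go with a single-char pattern and empty replacement is a filter
theorem pv_go_single (c : Char) : ∀ (l : List Char) (fuel : Nat) (acc : List Char),
    l.length ≤ fuel →
    PySem.Chars.replace.go [c] [] fuel l acc = acc.reverse ++ l.filter (· ≠ c) := by
  intro l
  induction l with
  | nil =>
      intro fuel acc _
      cases fuel <;> simp [PySem.Chars.replace.go]
  | cons x xs ih =>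
      intro fuel acc h
      cases fuel with
      | zero => simp at h
      | succ f =>
          by_cases hx : x = c
          · subst hx
            have hstep : PySem.Chars.replace.go [x] [] (f + 1) (x :: xs) acc
                = PySem.Chars.replace.go [x] [] f xs acc := by
              simp [PySem.Chars.replace.go, List.isPrefixOf]
            rw [hstep, ih f acc (by simpa using h)]
            simp
          · have hpre : [c].isPrefixOf (x :: xs) = false := by
              simp [List.isPrefixOf]
              exact fun hcx => (hx hcx.symm).elim
            simp only [PySem.Chars.replace.go, hpre, Bool.false_eq_true, if_false]
            rw [ih f (x :: acc) (by simpa using Nat.succ_le_succ_iff.mp h)]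
            simp [hx]

-- replacing one char by the empty string filters it out
theorem pv_replace_single (s : List Char) (c : Char) :
    PySem.Chars.replace s [c] [] = s.filter (· ≠ c) := by
  have := pv_go_single c s s.length [] (Nat.le_refl _)
  simpa [PySem.Chars.replace] using this

-- the fold of single-char replaces is one filter against the whole list
theorem pv_foldl_replace (bs : List Char) : ∀ (s : String),
    (bs.foldl (fun v ch => PySem.Str.replace v (String.ofList [ch]) "") s).toList
      = s.toList.filter (fun c => !bs.contains c) := by
  induction bs with
  | nil => intro s; simp
  | cons b bs ih =>
      intro s
      simp only [List.foldl_cons]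
      rw [ih]
      have hrep : (PySem.Str.replace s (String.ofList [b]) "").toList = s.toList.filter (· ≠ b) := by
        rw [PySem.Str.toList_replace, String.toList_ofList]
        show PySem.Chars.replace s.toList [b] "".toList = _
        rw [show ("" : String).toList = [] from rfl, pv_replace_single]
      rw [hrep, List.filter_filter]
      apply List.filter_congr
      intro c _
      by_cases hb : c = b <;> simp [hb]

-- a single-char substring test is membership
theorem pv_isIn_single (ch : Char) (s : String) :
    PySem.Str.isIn (String.ofList [ch]) s = s.toList.contains ch := by
  by_cases h : ch ∈ s.toList
  · rw [(PySem.Str.isIn_iff_infix (String.ofList [ch]) s).mpr]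
    · simp [h]
    · simpa using (List.singleton_infix_iff ch s.toList).mpr h
  · have : ¬ (String.ofList [ch]).toList <:+: s.toList := by
      intro hinf
      exact h (hinf.subset (by simp))
    simp only [List.contains_eq_mem, h, decide_false]
    cases heq : PySem.Str.isIn (String.ofList [ch]) s
    · rfl
    · exact absurd ((PySem.Str.isIn_iff_infix _ _).mp heq) this

-- ===== VERDICT (by name: the statement is the Claim_ definition above) =====
theorem verify_value_spec : Claim_equal_verify_value := by
  intro valor _
  unfold Spec_verify_value verify_value verify_value_alt
  split
  · apply String.toList_inj.mp
    rw [pv_foldl_replace, String.toList_ofList]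
  · rename_i hno
    have hall : ∀ ch ∈ pvBanChars, valor.toList.contains ch = false := by
      intro ch hch
      by_contra hc
      exact hno (List.any_eq_true.mpr ⟨ch, hch, by rw [pv_isIn_single]; simpa using hc⟩)
    have : valor.toList.filter (fun c => !pvBanChars.contains c) = valor.toList := by
      apply List.filter_eq_self.mpr
      intro c hc
      simp only [Bool.not_eq_eq_eq_not, Bool.not_true]
      by_contra hmem
      have : c ∈ pvBanChars := by
        simpa using (Bool.not_eq_false _).mp hmem
      have := hall c this
      simp [hc] at this
    rw [this]
    exact (String.ofList_toList (s := valor)).symm
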